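-- pv_equiv track=rewrite | github.com/rkdalsdn94/algoalgo | programmers/Lv3/숫자_게임.py | solution
-- ===== SOURCE A (Python) =====
-- def solution(A, B):
--     answer = 0
--
--     # B팀의 숫자들을 오름차순으로 정렬
--     sorted_B = sorted(B)
--
--     for a in A:
--         # a를 이길 수 있는 B팀의 가장 작은 숫자를 이진탐색으로 찾기
--         left, right = 0, len(sorted_B) - 1
--         position = len(sorted_B)  # 초기값을 리스트 길이로 설정
--
--         while left <= right:
--             mid = (left + right) // 2
--             if sorted_B[mid] > a:
--                 position = mid
--                 right = mid - 1
--             else: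
--                 left = mid + 1
--
--         # a를 이길 수 있는 숫자가 있으면 승점 증가 및 해당 숫자 제거
--         if position < len(sorted_B):
--             answer += 1
--             sorted_B.pop(position)
--         else:
--             # 이길 수 없으면 가장 작은 숫자 제거(어차피 질 경기)
--             sorted_B.pop(0)
--
--     return answer
-- ===== SOURCE B (Python) =====
-- def solution(A, B):
--     sa = sorted(A)
--     sb = sorted(B)
--     i = 0
--     for b in sb:
--         if i < len(sa) and b > sa[i]:
--             i += 1
--     return i
-- ===== Notes on version B (the rewrite author's own statement) =====
-- stated objective: faster
-- what changed: B replaces A's per-element binary search over a mutated sorted list (each pop is O(n)) by sorting both lists once and running a single two-pointer/greedy pass over sorted B against sorted A.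
import Mathlib
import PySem

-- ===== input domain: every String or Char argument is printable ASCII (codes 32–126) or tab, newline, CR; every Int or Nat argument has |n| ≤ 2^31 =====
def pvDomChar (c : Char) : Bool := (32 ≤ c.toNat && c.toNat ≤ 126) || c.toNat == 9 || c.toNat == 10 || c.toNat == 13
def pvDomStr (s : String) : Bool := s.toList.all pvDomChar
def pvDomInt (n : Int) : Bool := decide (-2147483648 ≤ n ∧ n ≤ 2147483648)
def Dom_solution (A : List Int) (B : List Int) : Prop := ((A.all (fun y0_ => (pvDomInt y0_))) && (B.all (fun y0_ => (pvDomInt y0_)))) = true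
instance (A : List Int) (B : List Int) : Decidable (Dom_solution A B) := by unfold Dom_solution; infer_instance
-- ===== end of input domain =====

-- B sorts both lists once and counts matches with a single two-pointer pass over sorted B,
-- replacing A's per-element binary search over a repeatedly mutated (popped) sorted list.


-- ===== PORT A =====
-- the `while left <= right` binary-search loop of A
def bsLoop (a : Int) (sb : List Int) (left right position : Int) : Int :=
  if h : left ≤ right then
    let mid := PySem.Int.floordiv (left + right) 2
    if PySem.List.pyGetD sb mid 0 > a then
      bsLoop a sb left (mid - 1) mid
    else
      bsLoop a sb (mid + 1) right position
  else position
termination_by (right + 1 - left).toNat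
decreasing_by
  · have hm := PySem.Int.floordiv_two_mid_bounds h
    omega
  · have hm := PySem.Int.floordiv_two_mid_bounds h
    omega

-- one iteration of A's `for a in A` loop; `none` = the Python raised (pop from empty list)
def stepA (st : Option (Int × List Int)) (a : Int) : Option (Int × List Int) :=
  match st with
  | none => none
  | some (answer, sb) =>
    let position := bsLoop a sb 0 ((sb.length : Int) - 1) (sb.length : Int)
    if position < (sb.length : Int) then
      match PySem.List.pop? sb position with
      | some (_, rest) => some (answer + 1, rest)
      | none => none
    else
      match PySem.List.pop? sb 0 with
      | some (_, rest) => some (answer, rest)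
      | none => none

def solution (A : List Int) (B : List Int) : Int :=
  let sortedB := PySem.List.sorted B (fun x => x) false
  match A.foldl stepA (some (0, sortedB)) with
  | some (answer, _) => answer
  | none => 0   -- unreachable under Pre_solution (there the Python raises IndexError)

-- ===== PORT B =====
def solution_alt (A : List Int) (B : List Int) : Int :=
  let sa := PySem.List.sorted A (fun x => x) false
  let sb := PySem.List.sorted B (fun x => x) false
  sb.foldl (fun i b => if i < (sa.length : Int) ∧ PySem.List.pyGetD sa i 0 < b then i + 1 else i) 0

-- ===== PRECONDITION & SPEC =====
-- Pre_ excludes exactly the inputs where A raises: with len(A) > len(B) the B-list is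
-- exhausted and A's `sorted_B.pop(...)` raises IndexError.
def Pre_solution (A : List Int) (B : List Int) : Prop := A.length ≤ B.length
instance (A : List Int) (B : List Int) : Decidable (Pre_solution A B) := by unfold Pre_solution; infer_instance

def pvWitness_solution : List Int × List Int := ([1, 3], [2, 2, 5])

def Spec_solution (A : List Int) (B : List Int) (out : Int) : Prop := out = solution_alt A B
instance (A : List Int) (B : List Int) (out : Int) : Decidable (Spec_solution A B out) := by unfold Spec_solution; infer_instance

-- ===== CLAIM (what is proved, stated in full; the proofs are below) =====
def Claim_equal_solution : Prop := ∀ (A : List Int) (B : List Int), Dom_solution A B → Pre_solution A B → Spec_solution A B (solution A B)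

-- ===== LEMMAS AND PROOFS =====

-- the two-pointer count on a structural recursion (proof-side model of B)
def mtp : List Int → List Int → Nat
  | _, [] => 0
  | [], _ :: _ => 0
  | a :: A', b :: B' => if a < b then mtp A' B' + 1 else mtp (a :: A') B'
termination_by _ B => B.length

-- proof-side model of A's loop: greedy over A, state = remaining sorted B
def gs : List Int → List Int → Nat × List Int
  | [], sb => (0, sb)
  | a :: A', sb =>
    if sb.any (fun b => decide (a < b)) then
      let r := gs A' (sb.eraseP (fun b => decide (a < b)))
      (r.1 + 1, r.2)
    else gs A' sb.tail

theorem mtp_nil (X : List Int) : mtp [] X = 0 := by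
  cases X <;> simp [mtp]

theorem dropWhile_head_false (p : Int → Bool) (l : List Int) (x : Int) (xs : List Int)
    (h : l.dropWhile p = x :: xs) : p x = false := by
  have := List.head_dropWhile_not p (l := l) (by rw [h]; simp)
  rwa [show (l.dropWhile p).head (by rw [h]; simp) = x by simp [h]] at this

theorem mtp_skip (s : Int) (T : List Int) :
    ∀ (C D : List Int), (∀ c ∈ C, ¬ s < c) → mtp (s :: T) (C ++ D) = mtp (s :: T) D := by
  intro C
  induction C with
  | nil => intro D _; rfl
  | cons c C' ih =>
    intro D hC
    have hc : ¬ s < c := hC c (by simp)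
    simp only [List.cons_append, mtp, if_neg hc]
    exact ih D (fun x hx => hC x (by simp [hx]))

theorem mtp_junk : ∀ (Bb X J : List Int), (∀ j ∈ J, ∀ b ∈ Bb, ¬ j < b) →
    mtp (X ++ J) Bb = mtp X Bb := by
  intro Bb
  induction Bb with
  | nil => intro X J _; simp [mtp]
  | cons b B' ih =>
    intro X J hJ
    cases X with
    | nil =>
      cases J with
      | nil => rfl
      | cons j J' =>
        have hj : ¬ j < b := hJ j (by simp) b (by simp)
        simp only [List.nil_append, mtp, if_neg hj]
        have := ih [] (j :: J') (fun x hx y hy => hJ x hx y (by simp [hy]))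
        simpa [mtp_nil] using this
    | cons x X' =>
      by_cases hx : x < b
      · simp only [List.cons_append, mtp, if_pos hx]
        have := ih X' J (fun u hu y hy => hJ u hu y (by simp [hy]))
        omega
      · simp only [List.cons_append, mtp, if_neg hx]
        exact ih (x :: X') J (fun u hu y hy => hJ u hu y (by simp [hy]))

theorem mtp_dropmin : ∀ (P : List Int) (b : Int) (B' : List Int),
    (∀ x ∈ B', b ≤ x) → B'.Pairwise (fun x y => x ≤ y) → P.length ≤ B'.length →
    mtp P (b :: B') = mtp P B' := by
  intro P
  induction P with
  | nil => intro b B' _ _ _; simp [mtp_nil]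
  | cons p P' ih =>
    intro b B' hmin hpw hlen
    by_cases hp : p < b
    · cases B' with
      | nil => simp at hlen
      | cons b1 B'' =>
        have hb1 : p < b1 := lt_of_lt_of_le hp (hmin b1 (by simp))
        simp only [mtp, if_pos hp, if_pos hb1]
        have : mtp P' (b1 :: B'') = mtp P' B'' := by
          apply ih b1 B'' (fun x hx => (List.pairwise_cons.mp hpw).1 x hx)
            ((List.pairwise_cons.mp hpw).2)
          simpa using Nat.le_of_succ_le_succ (by simpa using hlen)
        omega
    · simp only [mtp, if_neg hp]

theorem mtp_headswap (x y : Int) (T D : List Int)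
    (hx : ∀ d ∈ D, x < d) (hy : ∀ d ∈ D, y < d) : mtp (x :: T) D = mtp (y :: T) D := by
  cases D with
  | nil => simp [mtp]
  | cons d D' =>
    simp [mtp, if_pos (hx d (by simp)), if_pos (hy d (by simp))]

theorem mtp_insert_front (a : Int) : ∀ (S D : List Int), (∀ d ∈ D, a < d) →
    mtp (List.orderedInsert (· ≤ ·) a S) D = mtp (a :: S) D := by
  intro S
  induction S with
  | nil => intro D _; rfl
  | cons s S' ih =>
    intro D hD
    by_cases has : a ≤ s
    · simp [List.orderedInsert, if_pos has]
    · simp only [List.orderedInsert, if_neg has]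
      cases D with
      | nil => simp [mtp]
      | cons d D' =>
        have had : a < d := hD d (by simp)
        have hsd : s < d := lt_trans (by omega) had
        simp only [mtp, if_pos hsd, if_pos had]
        have h1 := ih D' (fun u hu => hD u (by simp [hu]))
        have h2 := mtp_headswap a s S' D' (fun u hu => hD u (by simp [hu]))
          (fun u hu => lt_trans (by omega : s < a) (hD u (by simp [hu])))
        omega

theorem mtp_K1 (a bstar : Int) (D : List Int) (hb : a < bstar) (hD : ∀ d ∈ D, bstar ≤ d) :
    ∀ (n : Nat) (S C : List Int), S.length + C.length ≤ n →
    S.Pairwise (fun x y => x ≤ y) → (∀ c ∈ C, ¬ a < c) →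
    mtp (List.orderedInsert (· ≤ ·) a S) (C ++ bstar :: D) = mtp S (C ++ D) + 1 := by
  intro n
  induction n with
  | zero =>
    intro S C hlen _ _
    have hS : S = [] := by cases S <;> simp_all
    have hC : C = [] := by cases C <;> simp_all
    subst hS; subst hC
    simp [List.orderedInsert, mtp, if_pos hb, mtp_nil]
  | succ n ih =>
    intro S C hlen hS hC
    have haD : ∀ d ∈ D, a < d := fun d hd => lt_of_lt_of_le hb (hD d hd)
    cases S with
    | nil =>
      rw [show List.orderedInsert (· ≤ ·) a [] = [a] from rfl]
      rw [mtp_skip a [] C (bstar :: D) hC]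
      simp [mtp, if_pos hb, mtp_nil]
    | cons s S' =>
      by_cases has : a ≤ s
      · rw [show List.orderedInsert (· ≤ ·) a (s :: S') = a :: s :: S' by
          simp [List.orderedInsert, if_pos has]]
        rw [mtp_skip a (s :: S') C (bstar :: D) hC]
        rw [mtp_skip s S' C D (fun c hc => by
          have := hC c hc; omega)]
        simp [mtp, if_pos hb]
      · rw [show List.orderedInsert (· ≤ ·) a (s :: S') =
            s :: List.orderedInsert (· ≤ ·) a S' by simp [List.orderedInsert, if_neg has]]
        have hsa : s < a := by omega
        cases C with
        | nil =>
          have hsb : s < bstar := lt_trans hsa hb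
          simp only [List.nil_append, mtp, if_pos hsb]
          rw [mtp_insert_front a S' D haD]
          rw [mtp_headswap a s S' D haD (fun d hd => lt_trans hsa (haD d hd))]
        | cons c C' =>
          by_cases hsc : s < c
          · simp only [List.cons_append, mtp, if_pos hsc]
            have := ih S' C' (by simp at hlen ⊢; omega)
              ((List.pairwise_cons.mp hS).2) (fun u hu => hC u (by simp [hu]))
            omega
          · simp only [List.cons_append, mtp, if_neg hsc]
            have h := ih (s :: S') C' (by simp at hlen ⊢; omega) hS
              (fun u hu => hC u (by simp [hu]))
            rw [show List.orderedInsert (· ≤ ·) a (s :: S') =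
              s :: List.orderedInsert (· ≤ ·) a S' by simp [List.orderedInsert, if_neg has]] at h
            exact h

theorem mtp_K2 (a : Int) (S sb : List Int)
    (hS : S.Pairwise (fun x y => x ≤ y)) (hsb : sb.Pairwise (fun x y => x ≤ y))
    (hall : ∀ b ∈ sb, ¬ a < b) (hlen : S.length < sb.length) :
    mtp (List.orderedInsert (· ≤ ·) a S) sb = mtp S sb.tail := by
  set p : Int → Bool := fun s => decide ¬ a ≤ s with hp
  have hsplit : S.takeWhile p ++ S.dropWhile p = S := List.takeWhile_append_dropWhile
  have hins : List.orderedInsert (· ≤ ·) a S = S.takeWhile p ++ a :: S.dropWhile p :=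
    List.orderedInsert_eq_take_drop (· ≤ ·) a S
  -- every element of a :: dropWhile is ≥ a, hence unbeatable by any b ∈ sb
  have hQ : ∀ j ∈ a :: S.dropWhile p, a ≤ j := by
    intro j hj
    rcases List.mem_cons.mp hj with h | h
    · omega
    · cases hQ0 : S.dropWhile p with
      | nil => rw [hQ0] at h; simp at h
      | cons q0 Q' =>
        have hq0 : a ≤ q0 := by
          have := dropWhile_head_false p S q0 Q' hQ0
          simp [hp] at this; exact this
        rw [hQ0] at h
        rcases List.mem_cons.mp h with h | h
        · omega
        · have hpw : (q0 :: Q').Pairwise (fun x y => x ≤ y) := by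
            rw [← hQ0]; exact hS.sublist (List.dropWhile_sublist p)
          have := (List.pairwise_cons.mp hpw).1 j h
          omega
  have hjunk1 : ∀ j ∈ a :: S.dropWhile p, ∀ b ∈ sb, ¬ j < b := by
    intro j hj b hb
    have := hQ j hj; have := hall b hb; omega
  have hjunk2 : ∀ j ∈ S.dropWhile p, ∀ b ∈ sb.tail, ¬ j < b := by
    intro j hj b hb
    exact hjunk1 j (by simp [hj]) b (List.mem_of_mem_tail hb)
  rw [hins, mtp_junk sb (S.takeWhile p) (a :: S.dropWhile p) hjunk1]
  conv_rhs => rw [← hsplit]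
  rw [mtp_junk sb.tail (S.takeWhile p) (S.dropWhile p) hjunk2]
  cases sb with
  | nil => simp at hlen
  | cons b0 sb' =>
    simp only [List.tail_cons]
    apply mtp_dropmin (S.takeWhile p) b0 sb'
      (fun x hx => (List.pairwise_cons.mp hsb).1 x hx) ((List.pairwise_cons.mp hsb).2)
    have h1 : (S.takeWhile p).length ≤ S.length :=
      (List.takeWhile_prefix p (l := S)).length_le
    simp at hlen; omega

-- ===== characterisation of A's binary search =====

-- `lfIdx a sb` = length of the failing prefix = first index of sb whose element beats a
def lfIdx (a : Int) (sb : List Int) : Nat :=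
  (sb.takeWhile (fun b => !decide (a < b))).length

theorem lfIdx_le (a : Int) (sb : List Int) : lfIdx a sb ≤ sb.length :=
  (List.takeWhile_prefix _ (l := sb)).length_le

theorem lfIdx_decomp (a : Int) (sb : List Int) (hsb : sb.Pairwise (fun x y => x ≤ y))
    (h : lfIdx a sb < sb.length) :
    ∃ C bstar D, sb = C ++ bstar :: D ∧ C.length = lfIdx a sb ∧
      (∀ c ∈ C, ¬ a < c) ∧ a < bstar ∧ (∀ d ∈ D, bstar ≤ d) := by
  set p : Int → Bool := fun b => !decide (a < b) with hp
  have hsplit : sb.takeWhile p ++ sb.dropWhile p = sb := List.takeWhile_append_dropWhile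
  have hlfdef : lfIdx a sb = (sb.takeWhile p).length := rfl
  have hdw : sb.dropWhile p ≠ [] := by
    intro hnil
    have h2 := congrArg List.length hsplit
    rw [hnil] at h2
    simp at h2
    omega
  cases hdwe : sb.dropWhile p with
  | nil => exact absurd hdwe hdw
  | cons bstar D =>
    refine ⟨sb.takeWhile p, bstar, D, ?_, hlfdef.symm, ?_, ?_, ?_⟩
    · conv_lhs => rw [← hsplit]
      rw [hdwe]
    · intro c hc
      have := List.mem_takeWhile_imp hc
      simp [hp] at this
      omega
    · have := dropWhile_head_false p sb bstar D hdwe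
      simp [hp] at this
      exact this
    · have hpw : (bstar :: D).Pairwise (fun x y => x ≤ y) := by
        rw [← hdwe]; exact hsb.sublist (List.dropWhile_sublist p)
      exact (List.pairwise_cons.mp hpw).1

theorem lfIdx_sat (a : Int) (sb : List Int) (hsb : sb.Pairwise (fun x y => x ≤ y)) :
    ∀ (i : Nat) (hi : i < sb.length), (a < sb[i] ↔ lfIdx a sb ≤ i) := by
  set p : Int → Bool := fun b => !decide (a < b) with hp
  intro i hi
  constructor
  · intro hlt
    by_contra hcon
    rw [not_le] at hcon
    have hcon' : i < (sb.takeWhile p).length := hcon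
    have hget : (sb.takeWhile p)[i]'hcon' = sb[i] :=
      (List.takeWhile_prefix p (l := sb)).getElem _
    have hmem : sb[i] ∈ sb.takeWhile p := by
      rw [← hget]; exact List.getElem_mem _
    have hle := List.mem_takeWhile_imp hmem
    simp [hp] at hle
    exact absurd hlt (not_lt.mpr hle)
  · intro hle
    have hlf : lfIdx a sb < sb.length := Nat.lt_of_le_of_lt hle hi
    obtain ⟨C, bstar, D, hsb', hlfC, _hC, hbst, hD⟩ := lfIdx_decomp a sb hsb hlf
    have hget : sb[i]'hi = (C ++ bstar :: D)[i]'(by rw [← hsb']; exact hi) :=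
      List.getElem_of_eq hsb' hi
    rw [List.getElem_append_right (by omega)] at hget
    have hgt : ∀ x ∈ bstar :: D, a < x := by
      intro x hx
      rcases List.mem_cons.mp hx with h | h
      · omega
      · have := hD x h; omega
    rw [hget]
    exact hgt _ (List.getElem_mem _)

theorem lfIdx_any (a : Int) (sb : List Int) (hsb : sb.Pairwise (fun x y => x ≤ y)) :
    sb.any (fun b => decide (a < b)) = true ↔ lfIdx a sb < sb.length := by
  constructor
  · intro h
    simp only [List.any_eq_true, decide_eq_true_eq] at h
    obtain ⟨x, hx, hax⟩ := h
    obtain ⟨i, hi, rfl⟩ := List.mem_iff_getElem.mp hx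
    have := (lfIdx_sat a sb hsb i hi).mp hax
    omega
  · intro h
    simp only [List.any_eq_true, decide_eq_true_eq]
    exact ⟨sb[lfIdx a sb], List.getElem_mem _, (lfIdx_sat a sb hsb _ h).mpr le_rfl⟩

theorem bsLoop_spec (a : Int) (sb : List Int) (hsb : sb.Pairwise (fun x y => x ≤ y)) :
    ∀ (k : Nat) (l r pos : Int), (r + 1 - l).toNat ≤ k →
    0 ≤ l → l ≤ r + 1 → r < (sb.length : Int) → l ≤ (lfIdx a sb : Int) →
    pos = (if lfIdx a sb < sb.length then max (lfIdx a sb : Int) (r + 1) else (sb.length : Int)) →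
    bsLoop a sb l r pos = (lfIdx a sb : Int) := by
  intro k
  induction k with
  | zero =>
    intro l r pos hk h0 hlr hr hllf hpos
    have hlr' : ¬ l ≤ r := by omega
    rw [bsLoop, dif_neg hlr']
    have hle := lfIdx_le a sb
    split at hpos <;> omega
  | succ k ih =>
    intro l r pos hk h0 hlr hr hllf hpos
    by_cases hc : l ≤ r
    · rw [bsLoop, dif_pos hc]
      have hm := PySem.Int.floordiv_two_mid_bounds hc
      set mid := PySem.Int.floordiv (l + r) 2 with hmid
      have hmid0 : 0 ≤ mid := by omega
      have hmidlen : mid < (sb.length : Int) := by omega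
      have hmn : mid.toNat < sb.length := by omega
      have hget : PySem.List.pyGetD sb mid 0 = sb[mid.toNat] :=
        PySem.List.pyGetD_eq_getElem sb 0 hmid0 hmidlen
      have hsat := lfIdx_sat a sb hsb mid.toNat hmn
      by_cases hgt : a < sb[mid.toNat]
      · have hlfm : (lfIdx a sb : Int) ≤ mid := by
          have := hsat.mp hgt; omega
        rw [if_pos (by rw [hget]; exact hgt)]
        apply ih l (mid - 1) mid (by omega) h0 (by omega) (by omega) hllf
        rw [if_pos (by omega)]
        omega
      · have hlfm : mid < (lfIdx a sb : Int) := by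
          have : ¬ lfIdx a sb ≤ mid.toNat := fun hcon => hgt (hsat.mpr hcon)
          omega
        rw [if_neg (by rw [hget]; exact hgt)]
        apply ih (mid + 1) r pos (by omega) (by omega) (by omega) hr (by omega) hpos
    · rw [bsLoop, dif_neg hc]
      have hle := lfIdx_le a sb
      split at hpos <;> omega

theorem bsLoop_top (a : Int) (sb : List Int) (hsb : sb.Pairwise (fun x y => x ≤ y)) :
    bsLoop a sb 0 ((sb.length : Int) - 1) (sb.length : Int) = (lfIdx a sb : Int) := by
  apply bsLoop_spec a sb hsb ((sb.length : Int) - 1 + 1 - 0).toNat _ _ _ le_rfl (by omega)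
    (by omega) (by omega) (by exact_mod_cast Int.natCast_nonneg (lfIdx a sb))
  have hle := lfIdx_le a sb
  split <;> omega

-- erasing at the first-beating index = erasing the first beating element
theorem eraseIdx_decomp (C D : List Int) (bstar : Int) :
    (C ++ bstar :: D).eraseIdx C.length = C ++ D := by
  rw [List.eraseIdx_append_of_length_le le_rfl]
  simp

theorem eraseP_decomp (a bstar : Int) (C D : List Int)
    (hC : ∀ c ∈ C, ¬ a < c) (hb : a < bstar) :
    (C ++ bstar :: D).eraseP (fun b => decide (a < b)) = C ++ D := by
  rw [List.eraseP_append_right _ (by intro c hc; simpa using hC c hc)]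
  rw [List.eraseP_cons_of_pos (by simpa using hb)]

-- ===== A's loop equals the abstract greedy `gs` =====

theorem foldA_eq_gs : ∀ (A : List Int) (sb : List Int) (ans : Int),
    sb.Pairwise (fun x y => x ≤ y) → A.length ≤ sb.length →
    A.foldl stepA (some (ans, sb)) = some (ans + ((gs A sb).1 : Int), (gs A sb).2) := by
  intro A
  induction A with
  | nil => intro sb ans _ _; simp [gs]
  | cons a A' ih =>
    intro sb ans hsb hlen
    have hstep : stepA (some (ans, sb)) a =
        (if sb.any (fun b => decide (a < b)) then
          some (ans + 1, sb.eraseP (fun b => decide (a < b)))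
        else some (ans, sb.tail)) := by
      rw [stepA]
      simp only [bsLoop_top a sb hsb]
      by_cases hany : sb.any (fun b => decide (a < b)) = true
      · have hlf : lfIdx a sb < sb.length := (lfIdx_any a sb hsb).mp hany
        rw [if_pos (by exact_mod_cast hlf), if_pos hany]
        rw [PySem.List.pop?_natCast sb (lfIdx a sb) hlf]
        obtain ⟨C, bstar, D, hsb', hlfC, hC, hbst, _hD⟩ := lfIdx_decomp a sb hsb hlf
        have heq : sb.eraseIdx (lfIdx a sb) = sb.eraseP (fun b => decide (a < b)) := by
          rw [← hlfC, hsb', eraseIdx_decomp, eraseP_decomp a bstar C D hC hbst]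
        rw [heq]
      · have hlf : ¬ lfIdx a sb < sb.length := fun hcon =>
          hany ((lfIdx_any a sb hsb).mpr hcon)
        rw [if_neg (by have := lfIdx_le a sb; intro hcon; exact hlf (by exact_mod_cast hcon)),
          if_neg hany]
        cases sb with
        | nil => simp at hlen
        | cons b0 sb' =>
          rw [PySem.List.pop?_zero_cons]
          simp
    rw [List.foldl_cons, hstep]
    by_cases hany : sb.any (fun b => decide (a < b)) = true
    · rw [if_pos hany]
      have hlf : lfIdx a sb < sb.length := (lfIdx_any a sb hsb).mp hany
      have hpw : (sb.eraseP (fun b => decide (a < b))).Pairwise (fun x y => x ≤ y) :=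
        hsb.sublist (List.eraseP_sublist)
      obtain ⟨C, bstar, D, hsb', hlfC, hC, hbst, _hD⟩ := lfIdx_decomp a sb hsb hlf
      have hE : sb.eraseP (fun b => decide (a < b)) = C ++ D := by
        rw [hsb', eraseP_decomp a bstar C D hC hbst]
      have hlen' : A'.length ≤ (sb.eraseP (fun b => decide (a < b))).length := by
        have h2 := congrArg List.length hsb'
        rw [hE]
        simp at h2 hlen ⊢
        omega
      rw [ih _ (ans + 1) hpw hlen']
      rw [show gs (a :: A') sb =
        ((gs A' (sb.eraseP (fun b => decide (a < b)))).1 + 1,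
          (gs A' (sb.eraseP (fun b => decide (a < b)))).2) by rw [gs, if_pos hany]]
      simp only [Option.some.injEq, Prod.mk.injEq]
      exact ⟨by push_cast; ring, trivial⟩
    · rw [if_neg hany]
      have hpw : sb.tail.Pairwise (fun x y => x ≤ y) := hsb.sublist (List.tail_sublist sb)
      have hlen' : A'.length ≤ sb.tail.length := by
        cases sb with
        | nil => simp at hlen
        | cons b0 sb' => simp at hlen ⊢; omega
      rw [ih _ ans hpw hlen']
      rw [show gs (a :: A') sb = gs A' sb.tail by rw [gs, if_neg hany]]

-- ===== the greedy equals the two-pointer count =====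

theorem gs_eq_mtp : ∀ (A sb : List Int), sb.Pairwise (fun x y => x ≤ y) →
    A.length ≤ sb.length →
    ((gs A sb).1 : Nat) = mtp (List.insertionSort (· ≤ ·) A) sb := by
  intro A
  induction A with
  | nil => intro sb _ _; simp [gs, List.insertionSort, mtp_nil]
  | cons a A' ih =>
    intro sb hsb hlen
    have hiS : List.insertionSort (· ≤ ·) (a :: A') =
        List.orderedInsert (· ≤ ·) a (List.insertionSort (· ≤ ·) A') := rfl
    have hpwS : (List.insertionSort (· ≤ ·) A').Pairwise (fun x y => x ≤ y) :=
      List.pairwise_insertionSort (· ≤ ·) A'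
    have hlenS : (List.insertionSort (· ≤ ·) A').length = A'.length :=
      (List.perm_insertionSort (· ≤ ·) A').length_eq
    by_cases hany : sb.any (fun b => decide (a < b)) = true
    · have hlf : lfIdx a sb < sb.length := (lfIdx_any a sb hsb).mp hany
      obtain ⟨C, bstar, D, hsb', hlfC, hC, hbst, hD⟩ := lfIdx_decomp a sb hsb hlf
      have hE : sb.eraseP (fun b => decide (a < b)) = C ++ D := by
        rw [hsb', eraseP_decomp a bstar C D hC hbst]
      have hpwE : (sb.eraseP (fun b => decide (a < b))).Pairwise (fun x y => x ≤ y) :=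
        hsb.sublist (List.eraseP_sublist)
      have hlenE : A'.length ≤ (sb.eraseP (fun b => decide (a < b))).length := by
        have h2 := congrArg List.length hsb'
        rw [hE]
        simp at h2 hlen ⊢
        omega
      rw [show gs (a :: A') sb =
        ((gs A' (sb.eraseP (fun b => decide (a < b)))).1 + 1,
          (gs A' (sb.eraseP (fun b => decide (a < b)))).2) by rw [gs, if_pos hany]]
      simp only []
      rw [hiS, ih _ hpwE hlenE, hE, hsb']
      exact (mtp_K1 a bstar D hbst hD
        ((List.insertionSort (· ≤ ·) A').length + C.length)
        (List.insertionSort (· ≤ ·) A') C le_rfl hpwS hC).symm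
    · have hall : ∀ b ∈ sb, ¬ a < b := by
        intro b hb hcon
        exact absurd (by simp only [List.any_eq_true, decide_eq_true_eq]; exact ⟨b, hb, hcon⟩) hany
      rw [show gs (a :: A') sb = gs A' sb.tail by rw [gs, if_neg hany]]
      have hpwT : sb.tail.Pairwise (fun x y => x ≤ y) := hsb.sublist (List.tail_sublist sb)
      have hlenT : A'.length ≤ sb.tail.length := by
        cases sb with
        | nil => simp at hlen
        | cons b0 sb' => simp at hlen ⊢; omega
      rw [ih _ hpwT hlenT, hiS]
      rw [mtp_K2 a (List.insertionSort (· ≤ ·) A') sb hpwS hsb hall (by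
        rw [hlenS]; simp at hlen; omega)]

-- ===== B's fold equals the two-pointer count =====

theorem foldB_eq_mtp (sa : List Int) : ∀ (sb : List Int) (i : Nat),
    sb.foldl (fun i b => if i < (sa.length : Int) ∧ PySem.List.pyGetD sa i 0 < b
      then i + 1 else i) (i : Int) = (i : Int) + (mtp (sa.drop i) sb : Int) := by
  intro sb
  induction sb with
  | nil => intro i; simp [mtp]
  | cons b sb' ih =>
    intro i
    rw [List.foldl_cons]
    by_cases hi : i < sa.length
    · have hD : sa.drop i = sa[i] :: sa.drop (i + 1) := List.drop_eq_getElem_cons hi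
      have hg : PySem.List.pyGetD sa (i : Int) 0 = sa.getD i 0 := by
        simp
      by_cases hlt : sa[i] < b
      · rw [if_pos ⟨by exact_mod_cast hi, by rw [hg, List.getD_eq_getElem sa 0 hi]; exact hlt⟩]
        rw [show ((i : Int) + 1) = ((i + 1 : Nat) : Int) by push_cast; ring]
        rw [ih (i + 1), hD]
        rw [show mtp (sa[i] :: sa.drop (i + 1)) (b :: sb') = mtp (sa.drop (i + 1)) sb' + 1 by
          rw [mtp, if_pos hlt]]
        push_cast; ring
      · rw [if_neg (by
          intro ⟨h1, h2⟩
          rw [hg, List.getD_eq_getElem sa 0 hi] at h2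
          exact hlt h2)]
        rw [ih i, hD]
        rw [show mtp (sa[i] :: sa.drop (i + 1)) (b :: sb') =
          mtp (sa[i] :: sa.drop (i + 1)) sb' by rw [mtp, if_neg hlt]]
    · rw [if_neg (by intro ⟨h1, _⟩; exact hi (by exact_mod_cast h1))]
      rw [ih i]
      rw [List.drop_eq_nil_of_le (by omega), mtp_nil, mtp_nil]

-- PySem's sorted with identity key is insertion sort by ≤
theorem pysorted_eq_insertionSort (xs : List Int) :
    PySem.List.sorted xs (fun x => x) false = List.insertionSort (· ≤ ·) xs :=
  PySem.List.sorted_id_eq_of_perm_of_pairwise xs _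
    (List.perm_insertionSort (· ≤ ·) xs) (List.pairwise_insertionSort (· ≤ ·) xs)

-- ===== VERDICT (by name: the statement is the Claim_ definition above) =====
theorem solution_spec : Claim_equal_solution := by
  intro A B _hdom hpre
  unfold Spec_solution solution solution_alt
  dsimp only
  have hpw : (PySem.List.sorted B (fun x => x) false).Pairwise (fun x y => x ≤ y) :=
    PySem.List.sorted_pairwise B (fun x => x)
  have hlen : A.length ≤ (PySem.List.sorted B (fun x => x) false).length := by
    rw [PySem.List.length_sorted]; exact hpre
  rw [foldA_eq_gs A _ 0 hpw hlen]
  rw [show ((0 : Int) + ((gs A (PySem.List.sorted B (fun x => x) false)).1 : Int))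
      = ((gs A (PySem.List.sorted B (fun x => x) false)).1 : Int) by ring]
  rw [gs_eq_mtp A _ hpw hlen]
  have hB := foldB_eq_mtp (PySem.List.sorted A (fun x => x) false)
    (PySem.List.sorted B (fun x => x) false) 0
  simp only [Nat.cast_zero, List.drop_zero, zero_add] at hB
  rw [hB, pysorted_eq_insertionSort B, pysorted_eq_insertionSort A]
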